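-- pv_equiv track=rewrite | github.com/JeongGod/Algo-study | hyeonjun/18week/p84512.py | solution
-- ===== SOURCE A (Python) =====
-- replace = {'A': 0, 'E': 1, 'I': 2, 'O': 3, 'U': 4}
--
-- def solution(word):
--     answer, length, tmp = 0, len(word)-1, 0
--     for idx in range(4, -1, -1):
--         if idx > length:
--             tmp *= 5
--             tmp += 5
--             continue
--         if idx != length:
--             tmp = 0
--             for _ in range(4-idx):
--                 tmp *= 5
--                 tmp += 5
--         answer += replace[word[idx]]*(tmp+1) + 1
--     return answer
-- ===== SOURCE B (Python) =====
-- replace = {'A': 0, 'E': 1, 'I': 2, 'O': 3, 'U': 4}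
--
-- def solution(word):
--     # rank = 1-based position in the enumeration of vowel words of length <= 5:
--     # each character at position i contributes replace[ch] * weight[i] + 1,
--     # where weight[i] = 1 + 5 + 25 + ... for the positions to its right.
--     answer = 0
--     for ch, weight in zip(word, [781, 156, 31, 6, 1]):
--         answer += replace[ch] * weight + 1
--     return answer
-- ===== Notes on version B (the rewrite author's own statement) =====
-- stated objective: simpler
-- what changed: Replaces A's backward countdown loop with its continue-branch and inner tmp-rebuilding loop by a single forward zip over the word and a precomputed weight table [781,156,31,6,1].
import Mathlib
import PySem

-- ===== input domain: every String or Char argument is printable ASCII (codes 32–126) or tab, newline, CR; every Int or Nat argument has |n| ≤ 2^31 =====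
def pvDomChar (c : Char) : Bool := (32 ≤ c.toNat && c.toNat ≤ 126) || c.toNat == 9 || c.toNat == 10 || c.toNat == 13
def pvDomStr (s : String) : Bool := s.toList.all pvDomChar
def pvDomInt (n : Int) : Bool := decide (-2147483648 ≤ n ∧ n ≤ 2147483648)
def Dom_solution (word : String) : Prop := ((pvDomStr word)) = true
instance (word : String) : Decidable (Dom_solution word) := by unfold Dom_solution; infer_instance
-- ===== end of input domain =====

-- B replaces A's backward countdown loop (with continue-branch and inner tmp-rebuilding loop)
-- by one forward zip of the word with the precomputed weight table [781,156,31,6,1] (simpler).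

-- the module-level dict 'replace' used by both Pythons
def replaceDict : PySem.Dict Char Int :=
  PySem.Dict.ofList [('A', 0), ('E', 1), ('I', 2), ('O', 3), ('U', 4)]

-- ===== PORT A =====
-- 'replace[word[idx]]': under Pre_solution the index is always in range and the key always
-- present, so the getD defaults below are unreachable (Python raises exactly where they fire).
def solution (word : String) : Int :=
  let length : Int := PySem.Str.len word - 1
  let r := (PySem.List.pyRange 4 (-1) (-1)).foldl
    (fun (s : Int × Int) idx =>
      if idx > length then
        (s.1, s.2 * 5 + 5)                        -- continue-branch: tmp = tmp*5+5
      else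
        let tmp := if idx ≠ length then
            (List.range (4 - idx).toNat).foldl (fun t _ => t * 5 + 5) 0   -- tmp rebuilt from 0
          else s.2
        (s.1 + (replaceDict.getD ((PySem.Str.pyGet? word idx).getD 'A') 0) * (tmp + 1) + 1, tmp))
    (0, 0)
  r.1

-- ===== PORT B =====
def solution_alt (word : String) : Int :=
  (word.toList.zip ([781, 156, 31, 6, 1] : List Int)).foldl
    (fun answer cw => answer + replaceDict.getD cw.1 0 * cw.2 + 1) 0

-- ===== PRECONDITION & SPEC =====
-- Pre_ excludes exactly the inputs on which Python A raises KeyError: a character among the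
-- first min(len, 5) characters that is not one of 'AEIOU'.
def Pre_solution (word : String) : Prop :=
  ((word.toList.take 5).all (fun c => c ∈ (['A', 'E', 'I', 'O', 'U'] : List Char))) = true
instance (word : String) : Decidable (Pre_solution word) := by unfold Pre_solution; infer_instance

def pvWitness_solution : String := "AUEIO"

def Spec_solution (word : String) (out : Int) : Prop := out = solution_alt word
instance (word : String) (out : Int) : Decidable (Spec_solution word out) := by unfold Spec_solution; infer_instance

-- ===== CLAIM (what is proved, stated in full; the proofs are below) =====
def Claim_equal_solution : Prop :=
  ∀ (word : String), Dom_solution word → Pre_solution word → Spec_solution word (solution word)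

-- ===== LEMMAS AND PROOFS =====

-- list-level form of the equation, proved by cases on the first five characters
theorem solution_key (cs : List Char) :
    (List.foldl
        (fun (s : Int × Int) idx =>
          if idx > (cs.length : Int) - 1 then (s.1, s.2 * 5 + 5)
          else
            let tmp := if idx ≠ (cs.length : Int) - 1 then
                (List.range (4 - idx).toNat).foldl (fun t _ => t * 5 + 5) 0
              else s.2
            (s.1 + replaceDict.getD ((PySem.Chars.pyGet? cs idx).getD 'A') 0 * (tmp + 1) + 1, tmp))
        (0, 0) [4, 3, 2, 1, 0]).1 =
      (cs.zip ([781, 156, 31, 6, 1] : List Int)).foldl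
        (fun answer cw => answer + replaceDict.getD cw.1 0 * cw.2 + 1) 0 := by
  rcases cs with _ | ⟨a, _ | ⟨b, _ | ⟨c, _ | ⟨d, _ | ⟨e, _ | ⟨f, rest⟩⟩⟩⟩⟩⟩
  · decide
  · simp [List.foldl, List.zip, PySem.List.pyGet?, PySem.List.pyIdx?]
  · simp [List.foldl, List.zip, PySem.List.pyGet?, PySem.List.pyIdx?, List.range_succ]; ring
  · simp [List.foldl, List.zip, PySem.List.pyGet?, PySem.List.pyIdx?, List.range_succ]; ring
  · simp [List.foldl, List.zip, PySem.List.pyGet?, PySem.List.pyIdx?, List.range_succ]; ring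
  · simp [List.foldl, List.zip, PySem.List.pyGet?, PySem.List.pyIdx?, List.range_succ]; ring
  · have hgt : ∀ idx : Int, idx ≤ 4 →
        (idx > (((a::b::c::d::e::f::rest).length : Int)) - 1) = False := by
      intro idx h; simp only [List.length_cons]; push_cast; simp; omega
    have hne : ∀ idx : Int, idx ≤ 4 →
        (idx ≠ (((a::b::c::d::e::f::rest).length : Int)) - 1) = True := by
      intro idx h; simp only [List.length_cons]; push_cast; simp; omega
    simp only [List.foldl, hgt 4 (by omega), hgt 3 (by omega), hgt 2 (by omega),
      hgt 1 (by omega), hgt 0 (by omega), hne 4 (by omega), hne 3 (by omega),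
      hne 2 (by omega), hne 1 (by omega), hne 0 (by omega), if_false, if_true]
    simp [List.zip, PySem.List.pyGet?, PySem.List.pyIdx?, List.range_succ]
    split_ifs
    all_goals try (exfalso; omega)
    all_goals simp_all
    all_goals ring

-- ===== VERDICT (by name: the statement is the Claim_ definition above) =====
theorem solution_spec : Claim_equal_solution := by
  intro word _ _
  unfold Spec_solution solution solution_alt
  have hR : PySem.List.pyRange 4 (-1) (-1) = [4, 3, 2, 1, 0] := by decide
  rw [hR]
  simp only [PySem.Str.len_eq, PySem.Str.pyGet?_eq]
  exact solution_key word.toList
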